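-- pv_equiv track=rewrite | github.com/leviaking/gamedev | rummy/app.py | is_valid_run
-- ===== SOURCE A (Python) =====
-- rank_values = {
--     '2': 2, '3': 3, '4': 4, '5': 5, '6': 6, '7': 7, '8': 8, '9': 9, '10': 10,
--     'J': 10, 'Q': 10, 'K': 10, 'A': 1
-- }
--
-- def is_valid_run(cards):
--     """Check if cards form a valid run (consecutive ranks, same suit)"""
--     if len(cards) < 3:
--         return False
--
--     # Extract ranks and suits
--     ranks = [card[:-1] for card in cards]
--     suits = [card[-1] for card in cards]
--
--     # All cards must have the same suit
--     if len(set(suits)) != 1: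
--         return False
--
--     # Sort ranks by their numerical value
--     sorted_ranks = sorted(ranks, key=lambda x: rank_values[x])
--
--     # Check if ranks are consecutive
--     for i in range(len(sorted_ranks) - 1):
--         current_rank = sorted_ranks[i]
--         next_rank = sorted_ranks[i + 1]
--
--         # Find the next expected rank
--         current_value = rank_values[current_rank]
--         expected_next_value = current_value + 1
--
--         # Handle Ace as both 1 and 14
--         if current_rank == 'K' and next_rank == 'A':
--             continue
--         elif current_rank == 'A' and next_rank == '2':
--             continue
--         elif rank_values[next_rank] != expected_next_value:
--             return False
--
--     return True
-- ===== SOURCE B (Python) =====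
-- rank_values = {
--     '2': 2, '3': 3, '4': 4, '5': 5, '6': 6, '7': 7, '8': 8, '9': 9, '10': 10,
--     'J': 10, 'Q': 10, 'K': 10, 'A': 1
-- }
--
-- def is_valid_run(cards):
--     """Check if cards form a valid run (consecutive ranks, same suit)"""
--     if len(cards) < 3:
--         return False
--     if len({card[-1] for card in cards}) != 1:
--         return False
--     values = [rank_values[card[:-1]] for card in cards]
--     return len(set(values)) == len(values) and max(values) - min(values) == len(values) - 1
-- ===== Notes on version B (the rewrite author's own statement) =====
-- stated objective: simpler
-- what changed: Replaces A's sort-by-rank-value plus index loop with special cases for K->A and A->2 by the order-free run test: one suit, all rank values distinct, and max(values) - min(values) == len(values) - 1.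
import Mathlib
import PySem

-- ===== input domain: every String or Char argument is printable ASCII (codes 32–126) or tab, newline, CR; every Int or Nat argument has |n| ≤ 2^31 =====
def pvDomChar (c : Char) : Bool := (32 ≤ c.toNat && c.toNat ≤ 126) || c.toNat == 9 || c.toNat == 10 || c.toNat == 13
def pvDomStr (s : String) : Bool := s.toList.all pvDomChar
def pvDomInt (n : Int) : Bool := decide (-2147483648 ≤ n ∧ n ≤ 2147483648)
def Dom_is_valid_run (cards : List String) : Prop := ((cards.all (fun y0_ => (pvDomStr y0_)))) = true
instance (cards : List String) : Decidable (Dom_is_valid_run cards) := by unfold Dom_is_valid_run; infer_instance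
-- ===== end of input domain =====

-- B replaces A's sort + special-cased pairwise index loop by the order-free test
-- "one suit, all rank values distinct, max - min = len - 1" (objective: simpler).

-- the module-level dict rank_values (shared context of both programs)
def rankValues : PySem.Dict String Int :=
  PySem.Dict.ofList [("2",2),("3",3),("4",4),("5",5),("6",6),("7",7),("8",8),("9",9),("10",10),("J",10),("Q",10),("K",10),("A",1)]

-- rank_values[x]; Python raises KeyError on a missing key — Pre_ excludes those inputs, the default 0 is never reached there
def rankVal (r : String) : Int := (rankValues.get? r).getD 0

-- ===== PORT A =====
-- the for-loop over range(len(sorted_ranks)-1) with its early return False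
def isValidRunLoop (sr : List String) : List Int → Bool
  | [] => true
  | i :: rest =>
    -- indices i, i+1 are always in range here; Pre_ makes the lookups total
    let current_rank := (PySem.List.pyGet? sr i).getD ""
    let next_rank := (PySem.List.pyGet? sr (i + 1)).getD ""
    let current_value := rankVal current_rank
    let expected_next_value := current_value + 1
    if current_rank == "K" && next_rank == "A" then isValidRunLoop sr rest
    else if current_rank == "A" && next_rank == "2" then isValidRunLoop sr rest
    else if rankVal next_rank != expected_next_value then false
    else isValidRunLoop sr rest

def is_valid_run (cards : List String) : Bool :=
  if PySem.List.len cards < 3 then false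
  else
    let ranks := cards.map (fun card => PySem.Str.slice card none (some (-1)))
    -- card[-1]; Python raises IndexError on an empty card — Pre_ excludes those, the Option stays `some`
    let suits := cards.map (fun card => PySem.Str.pyGet? card (-1))
    if PySem.Set.len (PySem.Set.ofList suits) ≠ 1 then false
    else
      let sorted_ranks := PySem.List.sorted ranks (fun x => rankVal x) false
      isValidRunLoop sorted_ranks (PySem.List.pyRange 0 (PySem.List.len sorted_ranks - 1) 1)

-- ===== PORT B =====
def is_valid_run_alt (cards : List String) : Bool :=
  if PySem.List.len cards < 3 then false
  else if PySem.Set.len (PySem.Set.ofList (cards.map (fun card => PySem.Str.pyGet? card (-1)))) ≠ 1 then false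
  else
    let values := cards.map (fun card => rankVal (PySem.Str.slice card none (some (-1))))
    -- max(values)/min(values): values is nonempty here, the getD 0 default is never reached
    (PySem.Set.len (PySem.Set.ofList values) == PySem.List.len values)
      && (((PySem.List.max? values (fun v => v)).getD 0 - (PySem.List.min? values (fun v => v)).getD 0)
            == PySem.List.len values - 1)

-- ===== PRECONDITION & SPEC =====
-- Pre_ excludes exactly the inputs where A raises (B raises at the same places):
-- with ≥ 3 cards, an empty-string card (IndexError at card[-1]) or, when all suits agree,
-- a card whose rank part is not a key of rank_values (KeyError in the sort key / comprehension).
def Pre_is_valid_run (cards : List String) : Prop :=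
  cards.length < 3 ∨
    ((∀ c ∈ cards, c ≠ "") ∧
      ((∃ c ∈ cards, PySem.Str.pyGet? c (-1) ≠ PySem.Str.pyGet? (cards.headD "") (-1)) ∨
        ∀ c ∈ cards, (rankValues.get? (PySem.Str.slice c none (some (-1)))).isSome = true))
instance (cards : List String) : Decidable (Pre_is_valid_run cards) := by unfold Pre_is_valid_run; infer_instance

def pvWitness_is_valid_run : List String := ["3h", "4h", "5h"]

def Spec_is_valid_run (cards : List String) (out : Bool) : Prop := out = is_valid_run_alt cards
instance (cards : List String) (out : Bool) : Decidable (Spec_is_valid_run cards out) := by unfold Spec_is_valid_run; infer_instance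

-- ===== CLAIM (what is proved, stated in full; the proofs are below) =====
def Claim_equal_is_valid_run : Prop := ∀ (cards : List String), Dom_is_valid_run cards → Pre_is_valid_run cards → Spec_is_valid_run cards (is_valid_run cards)

-- ===== LEMMAS AND PROOFS =====

-- adjacent check, structurally on the sorted list (what A's index loop computes)
def runChain : List String → Bool
  | [] => true
  | [_] => true
  | a :: b :: t =>
    if a == "K" && b == "A" then runChain (b :: t)
    else if a == "A" && b == "2" then runChain (b :: t)
    else if rankVal b != rankVal a + 1 then false
    else runChain (b :: t)

theorem pv_last_ge (a : Int) (t : List Int) (hp : (a :: t).Pairwise (· < ·)) :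
    a + t.length ≤ (a :: t).getLast (by simp) := by
  induction t generalizing a with
  | nil => simp
  | cons b t' ih =>
    have hb : a < b := List.rel_of_pairwise_cons hp (by simp)
    have h2 := ih b hp.of_cons
    rw [List.getLast_cons (by simp)]
    simp only [List.length_cons] at *
    push_cast at *
    omega

theorem pv_le_getLast (l : List Int) (h : l ≠ []) (hp : l.Pairwise (· ≤ ·)) :
    ∀ y ∈ l, y ≤ l.getLast h := by
  induction l with
  | nil => simp at h
  | cons a t ih =>
    intro y hy
    cases t with
    | nil => simp at hy; simp [hy]
    | cons b t' =>
      rw [List.getLast_cons (by simp)]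
      rcases List.mem_cons.1 hy with rfl | hy'
      · have h1 : y ≤ b := List.rel_of_pairwise_cons hp (by simp)
        have h2 := ih (by simp) hp.of_cons b (by simp)
        exact le_trans h1 h2
      · exact ih (by simp) hp.of_cons y hy'

theorem pv_head_le (a : Int) (t : List Int) (hp : (a :: t).Pairwise (· ≤ ·)) :
    ∀ y ∈ a :: t, a ≤ y := by
  intro y hy
  rcases List.mem_cons.1 hy with rfl | hy'
  · exact le_refl _
  · exact List.rel_of_pairwise_cons hp hy'

theorem chain_iff_nodup_span (a : Int) (t : List Int)
    (hp : (a :: t).Pairwise (· ≤ ·)) :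
    List.IsChain (fun x y => y = x + 1) (a :: t) ↔
      ((a :: t).Nodup ∧ (a :: t).getLast (by simp) = a + t.length) := by
  induction t generalizing a with
  | nil => simp
  | cons b t' ih =>
    have hple : (b :: t').Pairwise (· ≤ ·) := hp.of_cons
    rw [List.isChain_cons_cons, List.getLast_cons (by simp)]
    constructor
    · rintro ⟨hab, h'⟩
      obtain ⟨hn', hl'⟩ := (ih b hple).1 h'
      refine ⟨List.nodup_cons.2 ⟨?_, hn'⟩, by simp only [List.length_cons]; push_cast; omega⟩
      intro ha
      have := pv_head_le b t' hple a ha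
      omega
    · rintro ⟨hn, hl⟩
      have hab : a ≤ b := List.rel_of_pairwise_cons hp (by simp)
      have hane : a ≠ b := by rintro rfl; simp at hn
      have hn' : (b :: t').Nodup := (List.nodup_cons.1 hn).2
      have hlt : (b :: t').Pairwise (· < ·) :=
        (hple.and hn').imp (fun h => lt_of_le_of_ne h.1 h.2)
      have hge := pv_last_ge b t' hlt
      have hb : b = a + 1 := by
        simp only [List.length_cons] at hl; push_cast at hl; omega
      refine ⟨hb, (ih b hple).2 ⟨hn', ?_⟩⟩
      simp only [List.length_cons] at hl
      push_cast at hl ⊢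
      omega

theorem isValidRunLoop_eq_runChain (pre post sr : List String) (hsr : sr = pre ++ post) :
    isValidRunLoop sr (PySem.List.pyRange pre.length (PySem.List.len sr - 1) 1) = runChain post := by
  induction post generalizing pre with
  | nil =>
    rw [PySem.List.pyRange_one_eq_nil (by simp [hsr, PySem.List.len_eq])]
    simp [isValidRunLoop, runChain]
  | cons a post' ih =>
    cases post' with
    | nil =>
      rw [PySem.List.pyRange_one_eq_nil (by simp [hsr, PySem.List.len_eq])]
      simp [isValidRunLoop, runChain]
    | cons b t =>
      have hlen : PySem.List.len sr = (pre.length : Int) + (t.length + 2) := by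
        simp [hsr, PySem.List.len_eq]
        ring
      have hget1 : PySem.List.pyGet? sr (pre.length : Int) = some a := by
        rw [hsr]; exact PySem.List.pyGet?_append_length pre (b :: t) a
      have hget2 : PySem.List.pyGet? sr ((pre.length : Int) + 1) = some b := by
        have h2 : sr = (pre ++ [a]) ++ b :: t := by simp [hsr]
        rw [h2]
        have := PySem.List.pyGet?_append_length (pre ++ [a]) t b
        simpa using this
      have hih := ih (pre ++ [a]) (by simp [hsr])
      rw [PySem.List.pyRange_one_cons (by rw [hlen]; omega)]
      simp only [isValidRunLoop, hget1, hget2, Option.getD_some]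
      have hih' : isValidRunLoop sr (PySem.List.pyRange ((pre.length : Int) + 1) (PySem.List.len sr - 1) 1) = runChain (b :: t) := by
        simpa using hih
      simp only [runChain]
      split_ifs with h1 h2 h3 <;> simp_all

theorem runChain_eq_chain (l : List String)
    (hp : l.Pairwise (fun a b => rankVal a ≤ rankVal b)) :
    runChain l = decide (List.IsChain (fun a b => b = a + 1) (l.map rankVal)) := by
  induction l with
  | nil => simp [runChain]
  | cons a t ih =>
    cases t with
    | nil => simp [runChain]
    | cons b t' =>
      have hab : rankVal a ≤ rankVal b := List.rel_of_pairwise_cons hp (by simp)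
      have ih' := ih hp.of_cons
      simp only [runChain, List.map_cons, List.isChain_cons_cons]
      by_cases h1 : a = "K" ∧ b = "A"
      · exfalso
        rw [h1.1, h1.2] at hab
        have e1 : rankVal "K" = 10 := by decide
        have e2 : rankVal "A" = 1 := by decide
        rw [e1, e2] at hab
        omega
      · by_cases h2 : a = "A" ∧ b = "2"
        · obtain ⟨rfl, rfl⟩ := h2
          have e3 : rankVal "2" = rankVal "A" + 1 := by decide
          simp only [List.map_cons] at ih'
          simp [ih', e3]
        · have hb1 : (a == "K" && b == "A") = false := by
            simp only [Bool.and_eq_false_iff, beq_eq_false_iff_ne, ne_eq]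
            tauto
          have hb2 : (a == "A" && b == "2") = false := by
            simp only [Bool.and_eq_false_iff, beq_eq_false_iff_ne, ne_eq]
            tauto
          rw [hb1, hb2]
          simp only [Bool.false_eq_true, if_false]
          by_cases h3 : rankVal b = rankVal a + 1
          · simp only [List.map_cons] at ih'
            simp [h3, ih']
          · simp [h3]

theorem pv_setlen_iff (l : List Int) : ((PySem.Set.ofList l).length = l.length) ↔ l.Nodup := by
  constructor
  · intro h
    have hperm : (PySem.Set.ofList l).Perm l.dedup := by
      apply (List.perm_ext_iff_of_nodup (PySem.Set.nodup_ofList l) l.nodup_dedup).2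
      intro x
      simp [PySem.Set.mem_ofList, List.mem_dedup]
    have hlen : l.dedup.length = l.length := by rw [← hperm.length_eq, h]
    have heq := (List.dedup_sublist l).eq_of_length hlen
    rw [← heq]
    exact l.nodup_dedup
  · intro h
    rw [PySem.Set.ofList_eq_self_of_nodup l h]

theorem pv_max_eq (l vs : List Int) (hperm : vs.Perm l) (h : vs ≠ [])
    (hp : vs.Pairwise (· ≤ ·)) :
    PySem.List.max? l (fun v => v) = some (vs.getLast h) := by
  have hl : l ≠ [] := by
    intro hnil
    exact h (List.Perm.eq_nil (hnil ▸ hperm))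
  obtain ⟨m, hm⟩ : ∃ m, PySem.List.max? l (fun v => v) = some m := by
    cases hmx : PySem.List.max? l (fun v => v) with
    | none => exact absurd ((PySem.List.max?_eq_none_iff l (fun v => v)).1 hmx) hl
    | some m => exact ⟨m, rfl⟩
  have hm_mem : m ∈ vs := hperm.mem_iff.2 (PySem.List.max?_mem hm)
  have hle1 : m ≤ vs.getLast h := pv_le_getLast vs h hp m hm_mem
  have hle2 : vs.getLast h ≤ m :=
    PySem.List.max?_isMax hm _ (hperm.mem_iff.1 (List.getLast_mem h))
  rw [hm, le_antisymm hle1 hle2]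

theorem pv_min_eq (l : List Int) (v0 : Int) (vt : List Int) (hperm : (v0 :: vt).Perm l)
    (hp : (v0 :: vt).Pairwise (· ≤ ·)) :
    PySem.List.min? l (fun v => v) = some v0 := by
  have hl : l ≠ [] := by
    intro hnil
    exact absurd (List.Perm.eq_nil (hnil ▸ hperm)) (by simp)
  obtain ⟨m, hm⟩ : ∃ m, PySem.List.min? l (fun v => v) = some m := by
    cases hmx : PySem.List.min? l (fun v => v) with
    | none => exact absurd ((PySem.List.min?_eq_none_iff l (fun v => v)).1 hmx) hl
    | some m => exact ⟨m, rfl⟩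
  have hm_mem : m ∈ v0 :: vt := hperm.mem_iff.2 (PySem.List.min?_mem hm)
  have hle1 : v0 ≤ m := pv_head_le v0 vt hp m hm_mem
  have hle2 : m ≤ v0 := PySem.List.min?_isMin hm _ (hperm.mem_iff.1 (by simp))
  rw [hm, le_antisymm hle2 hle1]

theorem is_valid_run_spec : Claim_equal_is_valid_run := by
  unfold Claim_equal_is_valid_run
  intro cards _ _
  unfold Spec_is_valid_run is_valid_run is_valid_run_alt
  by_cases hlen : PySem.List.len cards < 3
  · rw [if_pos hlen, if_pos hlen]
  · rw [if_neg hlen, if_neg hlen]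
    dsimp only
    by_cases hsu : PySem.Set.len (PySem.Set.ofList (cards.map (fun card => PySem.Str.pyGet? card (-1)))) ≠ 1
    · rw [if_pos hsu, if_pos hsu]
    · rw [if_neg hsu, if_neg hsu]
      have h3 : 3 ≤ cards.length := by
        simp only [PySem.List.len_eq, not_lt] at hlen
        exact_mod_cast hlen
      have hA : isValidRunLoop
          (PySem.List.sorted (cards.map (fun card => PySem.Str.slice card none (some (-1)))) (fun x => rankVal x))
          (PySem.List.pyRange 0 (PySem.List.len (PySem.List.sorted (cards.map (fun card => PySem.Str.slice card none (some (-1)))) (fun x => rankVal x)) - 1) 1)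
          = runChain (PySem.List.sorted (cards.map (fun card => PySem.Str.slice card none (some (-1)))) (fun x => rankVal x)) := by
        have := isValidRunLoop_eq_runChain []
          (PySem.List.sorted (cards.map (fun card => PySem.Str.slice card none (some (-1)))) (fun x => rankVal x))
          (PySem.List.sorted (cards.map (fun card => PySem.Str.slice card none (some (-1)))) (fun x => rankVal x)) (by simp)
        simpa using this
      have hpk := PySem.List.sorted_pairwise (cards.map (fun card => PySem.Str.slice card none (some (-1)))) (fun x => rankVal x)
      rw [hA, runChain_eq_chain _ hpk]
      have hvsp := PySem.List.sorted_map_key_pairwise (cards.map (fun card => PySem.Str.slice card none (some (-1)))) (fun x => rankVal x)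
      have hvperm : ((PySem.List.sorted (cards.map (fun card => PySem.Str.slice card none (some (-1)))) (fun x => rankVal x)).map (fun x => rankVal x)).Perm
          (cards.map (fun card => rankVal (PySem.Str.slice card none (some (-1))))) := by
        have hp1 := List.Perm.map (fun x => rankVal x)
          (PySem.List.sorted_perm (cards.map (fun card => PySem.Str.slice card none (some (-1)))) (fun x => rankVal x) false)
        have hmm : (cards.map (fun card => PySem.Str.slice card none (some (-1)))).map (fun x => rankVal x)
            = cards.map (fun card => rankVal (PySem.Str.slice card none (some (-1)))) := by
          rw [List.map_map]; rfl
        rw [hmm] at hp1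
        exact hp1
      obtain ⟨v0, vt, hv⟩ : ∃ v0 vt,
          (PySem.List.sorted (cards.map (fun card => PySem.Str.slice card none (some (-1)))) (fun x => rankVal x)).map (fun x => rankVal x) = v0 :: vt := by
        cases hc : (PySem.List.sorted (cards.map (fun card => PySem.Str.slice card none (some (-1)))) (fun x => rankVal x)).map (fun x => rankVal x) with
        | nil =>
          exfalso
          have hl2 := congrArg List.length hc
          simp only [List.length_map, PySem.List.length_sorted, List.length_nil] at hl2
          omega
        | cons x xs => exact ⟨x, xs, rfl⟩
      rw [Bool.eq_iff_iff]
      simp only [decide_eq_true_eq, Bool.and_eq_true, beq_iff_eq]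
      rw [hv] at hvsp hvperm ⊢
      rw [chain_iff_nodup_span v0 vt hvsp]
      have hmax := pv_max_eq (cards.map (fun card => rankVal (PySem.Str.slice card none (some (-1))))) (v0 :: vt) hvperm (by simp) hvsp
      have hmin := pv_min_eq (cards.map (fun card => rankVal (PySem.Str.slice card none (some (-1))))) v0 vt hvperm hvsp
      rw [hmax, hmin]
      simp only [Option.getD_some]
      have hnodup_iff := hvperm.nodup_iff
      have hvallen : (cards.map (fun card => rankVal (PySem.Str.slice card none (some (-1))))).length = vt.length + 1 := by
        have h1 := congrArg List.length hv
        simp only [List.length_map, PySem.List.length_sorted, List.length_cons] at h1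
        simp [h1]
      have hsetlen : PySem.Set.len (PySem.Set.ofList (cards.map (fun card => rankVal (PySem.Str.slice card none (some (-1))))))
          = ((PySem.Set.ofList (cards.map (fun card => rankVal (PySem.Str.slice card none (some (-1)))))).length : Int) := by
        simp [PySem.Set.len]
      have hlistlen : PySem.List.len (cards.map (fun card => rankVal (PySem.Str.slice card none (some (-1)))))
          = ((cards.map (fun card => rankVal (PySem.Str.slice card none (some (-1))))).length : Int) := by
        simp [PySem.List.len_eq]
      rw [hsetlen, hlistlen]
      constructor
      · rintro ⟨hnd, hgl⟩
        have hv1 : (cards.map (fun card => rankVal (PySem.Str.slice card none (some (-1))))).Nodup := hnodup_iff.1 hnd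
        have hv2 := (pv_setlen_iff _).2 hv1
        refine ⟨by exact_mod_cast hv2, ?_⟩
        rw [hgl, hvallen]
        push_cast
        ring
      · rintro ⟨hsl, hdf⟩
        have hv1 : (cards.map (fun card => rankVal (PySem.Str.slice card none (some (-1))))).Nodup :=
          (pv_setlen_iff _).1 (by exact_mod_cast hsl)
        refine ⟨hnodup_iff.2 hv1, ?_⟩
        rw [hvallen] at hdf
        push_cast at hdf ⊢
        omega
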